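-- pv_equiv track=rewrite | github.com/DominteEmanuelBeniamin/Python-III_SI | Lab II/ex9.py | spectatori_nu_vad
-- ===== SOURCE A (Python) =====
-- def spectatori_nu_vad(matrix):
--     rezultat = []
--     randuri = len(matrix)
--     coloane = len(matrix[0])
--
--     for i in range(1, randuri):
--         for j in range(coloane):
--             for k in range(i):
--                 if matrix[k][j] >= matrix[i][j]:
--                     rezultat.append((i, j))
--                     break
--
--     return rezultat
-- ===== SOURCE B (Python) =====
-- def spectatori_nu_vad(matrix):
--     maxes = list(matrix[0])
--     coloane = len(maxes)
--     rezultat = []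
--     for i, row in enumerate(matrix[1:], 1):
--         for j in range(coloane):
--             if maxes[j] >= row[j]:
--                 rezultat.append((i, j))
--             else:
--                 maxes[j] = row[j]
--     return rezultat
-- ===== Notes on version B (the rewrite author's own statement) =====
-- stated objective: faster
-- what changed: Replaces the inner scan over all previous rows by a running per-column prefix maximum updated in one pass over the rows.
import Mathlib
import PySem

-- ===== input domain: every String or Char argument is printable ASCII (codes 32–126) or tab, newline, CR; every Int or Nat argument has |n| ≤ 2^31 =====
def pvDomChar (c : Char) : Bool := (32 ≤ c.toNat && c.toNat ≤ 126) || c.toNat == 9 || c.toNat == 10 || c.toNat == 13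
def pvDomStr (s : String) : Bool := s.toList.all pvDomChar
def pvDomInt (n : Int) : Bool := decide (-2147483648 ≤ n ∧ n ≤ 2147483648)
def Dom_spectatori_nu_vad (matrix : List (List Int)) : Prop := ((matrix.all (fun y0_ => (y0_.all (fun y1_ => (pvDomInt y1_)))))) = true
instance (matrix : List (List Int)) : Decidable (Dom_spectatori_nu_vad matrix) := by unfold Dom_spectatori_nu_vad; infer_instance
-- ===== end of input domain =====

-- B replaces A's rescan of all previous rows by a running per-column prefix maximum (one pass over the rows).

-- ===== PORT A =====
-- matrix[k][j], total form; exact under Pre_ (all indices in range there)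
def pvGetM (matrix : List (List Int)) (k j : Int) : Int :=
  PySem.List.pyGetD (PySem.List.pyGetD matrix k []) j 0

def spectatori_nu_vad (matrix : List (List Int)) : List (Int × Int) :=
  let randuri : Int := matrix.length
  let coloane : Int := (PySem.List.pyGetD matrix 0 []).length
  (PySem.List.pyRange 1 randuri 1).foldl (fun acc i =>
    (PySem.List.pyRange 0 coloane 1).foldl (fun acc j =>
      -- 'for k in range(i): if …: append; break' = append once if some k matches
      if (PySem.List.pyRange 0 i 1).any (fun k => pvGetM matrix k j ≥ pvGetM matrix i j)
      then acc ++ [(i, j)] else acc) acc) []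

-- ===== PORT B =====
-- one row of B's loop: for j in range(coloane): if maxes[j] >= row[j]: append else maxes[j] = row[j]
def pvRowStep (coloane : Int) (p : Int × List Int)
    (st : List Int × List (Int × Int)) : List Int × List (Int × Int) :=
  (PySem.List.pyRange 0 coloane 1).foldl (fun st j =>
    if PySem.List.pyGetD st.1 j 0 ≥ PySem.List.pyGetD p.2 j 0
    then (st.1, st.2 ++ [(p.1, j)])
    else (PySem.List.pySetD st.1 j (PySem.List.pyGetD p.2 j 0), st.2)) st

def spectatori_nu_vad_alt (matrix : List (List Int)) : List (Int × Int) :=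
  let maxes := PySem.List.pyGetD matrix 0 []
  let coloane : Int := maxes.length
  ((PySem.List.enumerate (matrix.drop 1) 1).foldl
    (fun st p => pvRowStep coloane p st) (maxes, [])).2

-- ===== PRECONDITION & SPEC =====
-- Pre_ excludes exactly the inputs where A raises IndexError: the empty matrix
-- (matrix[0]), and matrices where some row is shorter than row 0 (matrix[i][j]).
def Pre_spectatori_nu_vad (matrix : List (List Int)) : Prop :=
  matrix ≠ [] ∧ ∀ row ∈ matrix, (matrix.headD []).length ≤ row.length

instance (matrix : List (List Int)) : Decidable (Pre_spectatori_nu_vad matrix) := by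
  unfold Pre_spectatori_nu_vad; infer_instance

def pvWitness_spectatori_nu_vad : List (List Int) := [[1, 3], [2, 2], [0, 4]]

def Spec_spectatori_nu_vad (matrix : List (List Int)) (out : List (Int × Int)) : Prop := out = spectatori_nu_vad_alt matrix
instance (matrix : List (List Int)) (out : List (Int × Int)) : Decidable (Spec_spectatori_nu_vad matrix out) := by unfold Spec_spectatori_nu_vad; infer_instance

-- ===== CLAIM (what is proved, stated in full; the proofs are below) =====
def Claim_equal_spectatori_nu_vad : Prop := ∀ (matrix : List (List Int)), Dom_spectatori_nu_vad matrix → Pre_spectatori_nu_vad matrix → Spec_spectatori_nu_vad matrix (spectatori_nu_vad matrix)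

-- ===== LEMMAS AND PROOFS =====


-- proof-side helpers: the running prefix-max update and the canonical emission list

-- mx with every position n ≥ a replaced by max mx[n] row[n]
def pvUpd (a : Nat) (mx row : List Int) : List Int :=
  mx.mapIdx (fun n x => if a ≤ n then max x (PySem.List.pyGetD row (n : Int) 0) else x)

-- canonical form of the output: row by row, filter columns against the prefix max
def pvGo (c : Int) : List (List Int) → List Int → Int → List (Int × Int)
  | [], _, _ => []
  | row :: rest, mx, i =>
      ((PySem.List.pyRange 0 c 1).filter
        (fun j => decide (PySem.List.pyGetD mx j 0 ≥ PySem.List.pyGetD row j 0))).map (fun j => (i, j))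
      ++ pvGo c rest (pvUpd 0 mx row) (i + 1)

-- column maximum over the rows p0 :: ps at column j
def pvColMax (p0 : List Int) (ps : List (List Int)) (j : Int) : Int :=
  ps.foldl (fun m r => max m (PySem.List.pyGetD r j 0)) (PySem.List.pyGetD p0 j 0)

lemma pvLen_pvUpd (a : Nat) (mx row : List Int) : (pvUpd a mx row).length = mx.length := by
  simp [pvUpd]

lemma pvGetD_pvUpd (a : Nat) (mx row : List Int) (j : Int) (h0 : 0 ≤ j) (h1 : j < (mx.length : Int)) :
    PySem.List.pyGetD (pvUpd a mx row) j 0 =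
      if a ≤ j.toNat then max (PySem.List.pyGetD mx j 0) (PySem.List.pyGetD row j 0)
      else PySem.List.pyGetD mx j 0 := by
  obtain ⟨n, rfl⟩ : ∃ n : Nat, j = (n : Int) := ⟨j.toNat, (Int.toNat_of_nonneg h0).symm⟩
  have hn : n < mx.length := by exact_mod_cast h1
  simp [pvUpd, PySem.List.pyGetD_natCast, List.getD_eq_getElem?_getD, hn]

lemma pvUpd_ge_len (a : Nat) (mx row : List Int) (h : mx.length ≤ a) : pvUpd a mx row = mx := by
  apply List.ext_getElem (by simp [pvLen_pvUpd])
  intro n h1 h2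
  simp only [pvUpd, List.getElem_mapIdx]
  rw [if_neg (by omega)]

lemma pvFoldl_max_ge {α : Type} (g : α → Int) (L : List α) (m0 v : Int) :
    v ≤ L.foldl (fun m r => max m (g r)) m0 ↔ v ≤ m0 ∨ ∃ r ∈ L, v ≤ g r := by
  induction L generalizing m0 with
  | nil => simp
  | cons x xs ih => simp [ih, or_assoc]

lemma pvUpd_succ_skip (a : Int) (mx row : List Int) (h0 : 0 ≤ a)
    (h : PySem.List.pyGetD row a 0 ≤ PySem.List.pyGetD mx a 0) :
    pvUpd (a + 1).toNat mx row = pvUpd a.toNat mx row := by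
  apply List.ext_getElem (by simp [pvLen_pvUpd])
  intro n h1 h2
  simp only [pvUpd, List.getElem_mapIdx]
  by_cases hna : n = a.toNat
  · subst hna
    rw [if_neg (by omega), if_pos (by omega)]
    have hlen : a < (mx.length : Int) := by
      simp only [pvLen_pvUpd] at h2; omega
    rw [PySem.List.pyGetD_eq_getElem mx 0 h0 hlen] at h
    rw [show ((a.toNat : Int)) = a from by omega]
    exact (max_eq_left h).symm
  · by_cases hle : a.toNat ≤ n
    · rw [if_pos (by omega), if_pos hle]
    · rw [if_neg (by omega), if_neg hle]

lemma pvUpd_succ_set (a : Int) (mx row : List Int) (h0 : 0 ≤ a) (ha : a < (mx.length : Int))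
    (h : PySem.List.pyGetD mx a 0 < PySem.List.pyGetD row a 0) :
    pvUpd (a + 1).toNat (PySem.List.pySetD mx a (PySem.List.pyGetD row a 0)) row
      = pvUpd a.toNat mx row := by
  apply List.ext_getElem (by simp [pvLen_pvUpd, PySem.List.pySetD_of_nonneg _ _ h0])
  intro n h1 h2
  simp only [pvUpd, List.getElem_mapIdx, PySem.List.pySetD_of_nonneg _ _ h0, List.getElem_set]
  by_cases hna : n = a.toNat
  · subst hna
    rw [if_neg (by omega), if_pos rfl, if_pos (by omega)]
    rw [PySem.List.pyGetD_eq_getElem mx 0 h0 ha] at h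
    rw [show ((a.toNat : Int)) = a from by omega]
    exact (max_eq_right (le_of_lt h)).symm
  · by_cases hle : a.toNat ≤ n
    · rw [if_pos (by omega), if_pos hle, if_neg (fun e => hna e.symm)]
    · rw [if_neg (by omega), if_neg hle, if_neg (fun e => hna e.symm)]

lemma pvGetD_pySetD_ne (mx : List Int) (a j v : Int) (h0 : 0 ≤ a) (hj0 : 0 ≤ j)
    (hjl : j < (mx.length : Int)) (hne : j ≠ a) :
    PySem.List.pyGetD (PySem.List.pySetD mx a v) j 0 = PySem.List.pyGetD mx j 0 := by
  rw [PySem.List.pySetD_of_nonneg _ _ h0,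
      PySem.List.pyGetD_eq_getElem _ 0 hj0 (by simpa using hjl),
      List.getElem_set, if_neg (by omega),
      ← PySem.List.pyGetD_eq_getElem mx 0 hj0 hjl]

lemma pvInner (i : Int) (row : List Int) (c : Int) :
    ∀ (n : Nat) (a : Int) (mx : List Int) (out : List (Int × Int)),
    0 ≤ a → a + (n : Int) = c → (mx.length : Int) = c →
    (PySem.List.pyRange a c 1).foldl (fun st j =>
        if PySem.List.pyGetD st.1 j 0 ≥ PySem.List.pyGetD row j 0
        then (st.1, st.2 ++ [(i, j)])
        else (PySem.List.pySetD st.1 j (PySem.List.pyGetD row j 0), st.2)) (mx, out)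
    = (pvUpd a.toNat mx row,
       out ++ ((PySem.List.pyRange a c 1).filter
         (fun j => decide (PySem.List.pyGetD mx j 0 ≥ PySem.List.pyGetD row j 0))).map (fun j => (i, j))) := by
  intro n
  induction n with
  | zero =>
    intro a mx out h0 hac hlen
    rw [PySem.List.pyRange_one_eq_nil (by omega)]
    simp [pvUpd_ge_len a.toNat mx row (by omega)]
  | succ n ih =>
    intro a mx out h0 hac hlen
    have hlt : a < c := by push_cast at hac ⊢; omega
    rw [PySem.List.pyRange_one_cons hlt]
    simp only [List.foldl_cons, List.filter_cons]
    by_cases h : PySem.List.pyGetD mx a 0 ≥ PySem.List.pyGetD row a 0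
    · rw [if_pos h, ih (a + 1) mx (out ++ [(i, a)]) (by omega) (by push_cast at hac ⊢; omega) hlen]
      rw [pvUpd_succ_skip a mx row h0 h]
      simp [h]
    · rw [if_neg h]
      have hsetlen : (((PySem.List.pySetD mx a (PySem.List.pyGetD row a 0)).length : Int)) = c := by
        rw [PySem.List.pySetD_of_nonneg _ _ h0]; simpa using hlen
      rw [ih (a + 1) _ out (by omega) (by push_cast at hac ⊢; omega) hsetlen]
      rw [pvUpd_succ_set a mx row h0 (by omega) (not_le.mp h)]
      rw [if_neg (by simpa using h)]
      refine congrArg _ (congrArg _ (congrArg (List.map _) (List.filter_congr ?_)))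
      intro j hj
      rw [PySem.List.mem_pyRange_one] at hj
      rw [pvGetD_pySetD_ne mx a j _ h0 (by omega) (by omega) (by omega)]

lemma pvBLoop (c : Int) :
    ∀ (rows : List (List Int)) (i : Int) (mx : List Int) (out : List (Int × Int)),
    (mx.length : Int) = c →
    (PySem.List.enumerate rows i).foldl (fun st p => pvRowStep c p st) (mx, out)
    = (rows.foldl (fun m r => pvUpd 0 m r) mx, out ++ pvGo c rows mx i) := by
  intro rows
  induction rows with
  | nil => intro i mx out _; simp [PySem.List.enumerate, pvGo]
  | cons row rest ih =>
    intro i mx out hlen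
    rw [PySem.List.enumerate_cons]
    simp only [List.foldl_cons]
    have hc0 : 0 ≤ c := by omega
    have hstep := pvInner i row c c.toNat 0 mx out le_rfl (by omega) hlen
    show (PySem.List.enumerate rest (i + 1)).foldl (fun st p => pvRowStep c p st)
        (pvRowStep c (i, row) (mx, out)) = _
    have hrs : pvRowStep c (i, row) (mx, out)
        = (pvUpd 0 mx row, out ++ ((PySem.List.pyRange 0 c 1).filter
            (fun j => decide (PySem.List.pyGetD mx j 0 ≥ PySem.List.pyGetD row j 0))).map
              (fun j => (i, j))) := by
      unfold pvRowStep
      simpa using hstep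
    rw [hrs, ih (i + 1) _ _ (by simpa [pvLen_pvUpd] using hlen)]
    simp [pvGo]

lemma pvALoop (c : Int) (matrix : List (List Int)) :
    ∀ (rest ps : List (List Int)) (mx p0 : List Int),
    matrix = p0 :: (ps ++ rest) →
    (mx.length : Int) = c →
    (∀ j : Int, 0 ≤ j → j < c → PySem.List.pyGetD mx j 0 = pvColMax p0 ps j) →
    (PySem.List.pyRange (1 + (ps.length : Int)) (matrix.length : Int) 1).flatMap
      (fun i => ((PySem.List.pyRange 0 c 1).filter
        (fun j => (PySem.List.pyRange 0 i 1).any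
          (fun k => pvGetM matrix k j ≥ pvGetM matrix i j))).map (fun j => (i, j)))
    = pvGo c rest mx (1 + (ps.length : Int)) := by
  intro rest
  induction rest with
  | nil =>
    intro ps mx p0 hm _ _
    rw [PySem.List.pyRange_one_eq_nil
      (show (matrix.length : Int) ≤ 1 + (ps.length : Int) from by
        rw [hm]; simp)]
    simp [pvGo]
  | cons row rest ih =>
    intro ps mx p0 hm hlen hmx
    have hc0 : 0 ≤ c := by omega
    have hmlen : ((matrix.length : Int)) = 1 + ps.length + (1 + rest.length) := by
      rw [hm]; simp [List.length_append]; omega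
    have hget0 : PySem.List.pyGetD matrix (0 : Int) [] = p0 := by
      rw [hm]; exact PySem.List.pyGetD_zero_cons _ _ _
    have hgetk : ∀ k : Int, 1 ≤ k → k < 1 + (ps.length : Int) →
        PySem.List.pyGetD matrix k [] = PySem.List.pyGetD ps (k - 1) [] := by
      intro k hk1 hk2
      obtain ⟨t, rfl⟩ : ∃ t : Nat, k = ((t + 1 : Nat) : Int) :=
        ⟨(k - 1).toNat, by omega⟩
      have ht : t < ps.length := by omega
      rw [hm, PySem.List.pyGetD_natCast,
          show ((t + 1 : Nat) : Int) - 1 = ((t : Nat) : Int) from by push_cast; omega,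
          PySem.List.pyGetD_natCast, List.getD_cons_succ]
      exact List.getD_append ps (row :: rest) [] t ht
    have hrowi : PySem.List.pyGetD matrix (1 + (ps.length : Int)) [] = row := by
      rw [hm, show (1 : Int) + (ps.length : Int) = ((ps.length + 1 : Nat) : Int) from by push_cast; omega,
          PySem.List.pyGetD_natCast, List.getD_cons_succ,
          List.getD_append_right ps (row :: rest) [] ps.length le_rfl]
      simp
    rw [PySem.List.pyRange_one_cons
      (show (1 : Int) + (ps.length : Int) < (matrix.length : Int) from by omega),
      List.flatMap_cons]
    have hhead : ((PySem.List.pyRange 0 c 1).filter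
        (fun j => (PySem.List.pyRange 0 (1 + (ps.length : Int)) 1).any
          (fun k => pvGetM matrix k j ≥ pvGetM matrix (1 + (ps.length : Int)) j))).map
            (fun j => (1 + (ps.length : Int), j))
        = ((PySem.List.pyRange 0 c 1).filter
        (fun j => decide (PySem.List.pyGetD mx j 0 ≥ PySem.List.pyGetD row j 0))).map
            (fun j => (1 + (ps.length : Int), j)) := by
      refine congrArg (List.map _) (List.filter_congr ?_)
      intro j hj
      rw [PySem.List.mem_pyRange_one] at hj
      rw [Bool.eq_iff_iff]
      simp only [List.any_eq_true, decide_eq_true_eq, ge_iff_le]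
      rw [hmx j hj.1 hj.2]
      simp only [pvGetM, hrowi]
      constructor
      · rintro ⟨k, hk, hge⟩
        rw [PySem.List.mem_pyRange_one] at hk
        refine (pvFoldl_max_ge (fun r => PySem.List.pyGetD r j 0) ps _ _).mpr ?_
        by_cases hk0 : k = 0
        · subst hk0
          rw [hget0] at hge
          exact Or.inl hge
        · rw [hgetk k (by omega) (by omega)] at hge
          refine Or.inr ⟨PySem.List.pyGetD ps (k - 1) [], PySem.List.pyGetD_mem ps []
            (by simp [PySem.Raise.InRange]; omega), hge⟩
      · intro hv
        rcases (pvFoldl_max_ge (fun r => PySem.List.pyGetD r j 0) ps _ _).mp hv with h0 | ⟨r, hr, hvr⟩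
        · exact ⟨0, by rw [PySem.List.mem_pyRange_one]; omega, by rw [hget0]; exact h0⟩
        · obtain ⟨t, ht, rfl⟩ := List.getElem_of_mem hr
          refine ⟨1 + (t : Int), by rw [PySem.List.mem_pyRange_one]; omega, ?_⟩
          rw [hgetk (1 + t) (by omega) (by omega),
              show (1 : Int) + t - 1 = ((t : Nat) : Int) from by omega,
              PySem.List.pyGetD_natCast, List.getD_eq_getElem ps [] ht]
          exact hvr
    rw [hhead]
    have hmx' : ∀ j : Int, 0 ≤ j → j < c →
        PySem.List.pyGetD (pvUpd 0 mx row) j 0 = pvColMax p0 (ps ++ [row]) j := by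
      intro j hj0 hjc
      rw [pvGetD_pvUpd 0 mx row j hj0 (by omega), if_pos (by omega), hmx j hj0 hjc]
      simp [pvColMax]
    have hIH := ih (ps ++ [row]) (pvUpd 0 mx row) p0
      (by rw [hm]; simp) (by simpa [pvLen_pvUpd] using hlen) hmx'
    rw [show (1 : Int) + ((ps ++ [row]).length : Int) = 1 + (ps.length : Int) + 1 from by
          simp; omega] at hIH
    rw [hIH]
    simp [pvGo]

-- ===== VERDICT (by name: the statement is the Claim_ definition above) =====
theorem spectatori_nu_vad_spec : Claim_equal_spectatori_nu_vad := by
  intro matrix _ hpre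
  obtain ⟨hne, -⟩ := hpre
  cases matrix with
  | nil => exact absurd rfl hne
  | cons first rest =>
    unfold Spec_spectatori_nu_vad spectatori_nu_vad spectatori_nu_vad_alt
    simp only [PySem.List.pyGetD_zero_cons, List.drop_one, List.tail_cons]
    have hA := pvALoop ((first.length : Int)) (first :: rest) rest [] first first rfl (by simp)
        (by intro j _ _; simp [pvColMax])
    have hB := pvBLoop ((first.length : Int)) rest 1 first [] (by simp)
    norm_num at hA
    simp only [PySem.List.foldl_append_if]
    rw [PySem.List.foldl_append_eq_flatMap, hB]
    simpa using hA
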